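-- pv_equiv track=rewrite | github.com/piplupmaster32/quanfluence | ilp2qubo/ilp2qubo.py | _bounded_coefficient_encoding
-- ===== SOURCE A (Python) =====
-- def _bounded_coefficient_encoding(U, var_name):
--     """Same as before"""
--     if U == 0:
--         return {}
--
--     coeffs = []
--     d = 1
--     s_i = 1
--     current_sum = 0
--
--     while current_sum + s_i < U:
--         coeffs.append(s_i)
--         current_sum += s_i
--         s_i = d * s_i + 1
--
--     if U - current_sum > 0:
--         coeffs.append(U - current_sum)
--
--     encoding = {f"{var_name}_{i}": s for i, s in enumerate(coeffs)}
--     return encoding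
-- ===== SOURCE B (Python) =====
-- def _bounded_coefficient_encoding(U, var_name):
--     if U <= 0:
--         return {}
--     # largest k with k*(k+1)//2 < U, by binary search; invariant T(lo) < U <= T(hi)
--     lo, hi = 0, U
--     while hi - lo > 1:
--         mid = (lo + hi) // 2
--         if mid * (mid + 1) // 2 < U:
--             lo = mid
--         else:
--             hi = mid
--     k = lo
--     coeffs = list(range(1, k + 1))
--     r = U - k * (k + 1) // 2
--     if r > 0:
--         coeffs.append(r)
--     return {f"{var_name}_{i}": s for i, s in enumerate(coeffs)}
-- ===== Notes on version B (the rewrite author's own statement) =====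
-- stated objective: alternative
-- what changed: Replaces A's one-step-at-a-time accumulation loop by a binary search for the largest k with k*(k+1)//2 < U plus a closed-form range(1, k+1) for the coefficient list.
import Mathlib
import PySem

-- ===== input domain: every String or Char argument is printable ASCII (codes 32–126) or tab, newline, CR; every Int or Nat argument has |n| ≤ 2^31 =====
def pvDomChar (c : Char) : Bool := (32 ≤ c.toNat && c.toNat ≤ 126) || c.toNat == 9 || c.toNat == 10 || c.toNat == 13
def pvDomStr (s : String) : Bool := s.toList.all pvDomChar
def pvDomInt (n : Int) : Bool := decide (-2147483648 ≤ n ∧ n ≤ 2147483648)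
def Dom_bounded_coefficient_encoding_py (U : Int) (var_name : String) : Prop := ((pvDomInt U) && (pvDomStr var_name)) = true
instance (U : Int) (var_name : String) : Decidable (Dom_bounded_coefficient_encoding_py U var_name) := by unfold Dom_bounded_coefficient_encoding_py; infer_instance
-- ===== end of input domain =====

-- B replaces A's one-coefficient-at-a-time accumulation loop by a binary search for the
-- largest k with k*(k+1)//2 < U plus a closed-form range(1, k+1); objective: alternative.

-- ===== PORT A =====
-- A's while loop; fuel = U.toNat + 1 is enough since current_sum grows by s_i ≥ 1 per step.
-- Returns (coeffs, final current_sum); s_i update kept literally as d*s_i + 1 with d = 1.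
def pvALoop : Nat → Int → Int → Int → List Int × Int
  | 0, _, _, cur => ([], cur)
  | fuel+1, U, s, cur =>
    if cur + s < U then
      let r := pvALoop fuel U (1 * s + 1) (cur + s)
      (s :: r.1, r.2)
    else ([], cur)

-- dict comprehension {f"{var_name}_{i}": s for i, s in enumerate(coeffs)}
def pvEncodeA (var_name : String) (coeffs : List Int) : List (String × Int) :=
  ((PySem.List.enumerate coeffs 0).foldl
    (fun (d : PySem.Dict String Int) p => d.insert (var_name ++ "_" ++ PySem.Int.toStr p.1) p.2)
    PySem.Dict.empty).items

def bounded_coefficient_encoding_py (U : Int) (var_name : String) : List (String × Int) :=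
  if U = 0 then []
  else
    let p := pvALoop (U.toNat + 1) U 1 0
    let coeffs := if U - p.2 > 0 then p.1 ++ [U - p.2] else p.1
    pvEncodeA var_name coeffs

-- ===== PORT B =====
-- binary search keeping T(lo) < U ≤ T(hi); fuel = U.toNat bounds the shrinking gap hi - lo
def pvBSearch : Nat → Int → Int → Int → Int
  | 0, _, lo, _ => lo
  | fuel+1, U, lo, hi =>
    if hi - lo > 1 then
      let mid := PySem.Int.floordiv (lo + hi) 2
      if PySem.Int.floordiv (mid * (mid + 1)) 2 < U then pvBSearch fuel U mid hi
      else pvBSearch fuel U lo mid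
    else lo

-- same dict comprehension as in A's source (the two Pythons share that final line)
def pvEncodeB (var_name : String) (coeffs : List Int) : List (String × Int) :=
  ((PySem.List.enumerate coeffs 0).foldl
    (fun (d : PySem.Dict String Int) p => d.insert (var_name ++ "_" ++ PySem.Int.toStr p.1) p.2)
    PySem.Dict.empty).items

def bounded_coefficient_encoding_py_alt (U : Int) (var_name : String) : List (String × Int) :=
  if U ≤ 0 then []
  else
    let k := pvBSearch U.toNat U 0 U
    let r := U - PySem.Int.floordiv (k * (k + 1)) 2
    let coeffs := if r > 0 then PySem.List.pyRange 1 (k + 1) 1 ++ [r]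
                  else PySem.List.pyRange 1 (k + 1) 1
    pvEncodeB var_name coeffs

-- ===== PRECONDITION & SPEC =====
def Spec_bounded_coefficient_encoding_py (U : Int) (var_name : String) (out : List (String × Int)) : Prop := out = bounded_coefficient_encoding_py_alt U var_name
instance (U : Int) (var_name : String) (out : List (String × Int)) : Decidable (Spec_bounded_coefficient_encoding_py U var_name out) := by unfold Spec_bounded_coefficient_encoding_py; infer_instance

-- ===== CLAIM (what is proved, stated in full; the proofs are below) =====
def Claim_equal_bounded_coefficient_encoding_py : Prop := ∀ (U : Int) (var_name : String), Dom_bounded_coefficient_encoding_py U var_name → Spec_bounded_coefficient_encoding_py U var_name (bounded_coefficient_encoding_py U var_name)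

-- ===== LEMMAS AND PROOFS =====

-- T(k) = k*(k+1)//2 as both programs compute it
def pvT (k : Int) : Int := PySem.Int.floordiv (k * (k + 1)) 2

theorem pvT_two (k : Int) : 2 * pvT k = k * (k + 1) := by
  unfold pvT
  rw [PySem.Int.floordiv_eq_ediv_of_pos (by omega)]
  exact Int.mul_ediv_cancel' (even_iff_two_dvd.mp (Int.even_mul_succ_self k))

theorem pvT_mono {a b : Int} (h0 : 0 ≤ a) (hab : a ≤ b) : pvT a ≤ pvT b := by
  have ha := pvT_two a; have hb := pvT_two b
  nlinarith

theorem pvT_zero : pvT 0 = 0 := by decide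

theorem pvT_step (s : Int) : pvT (s - 1) + s = pvT s := by
  have h1 := pvT_two (s - 1); have h2 := pvT_two s
  nlinarith

theorem pvT_ge_self {k : Int} (hk : 0 ≤ k) : k ≤ pvT k := by
  have h := pvT_two k
  nlinarith [mul_nonneg hk hk]

-- the unique k both programs find: largest k ≥ 0 with T(k) < U
def pvKSpec (U k : Int) : Prop := 0 ≤ k ∧ pvT k < U ∧ U ≤ pvT (k + 1)

theorem pvKSpec_unique {U k1 k2 : Int} (h1 : pvKSpec U k1) (h2 : pvKSpec U k2) : k1 = k2 := by
  obtain ⟨a1, b1, c1⟩ := h1; obtain ⟨a2, b2, c2⟩ := h2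
  by_contra hne
  rcases lt_or_gt_of_ne hne with h | h
  · have := pvT_mono (a := k1 + 1) (b := k2) (by omega) (by omega); omega
  · have := pvT_mono (a := k2 + 1) (b := k1) (by omega) (by omega); omega

theorem pvKSpec_exists {U : Int} (hU : 1 ≤ U) : ∃ k, pvKSpec U k := by
  induction U, hU using Int.le_induction with
  | base => exact ⟨0, by norm_num [pvKSpec, pvT_zero], by decide⟩
  | succ n hn ih =>
    obtain ⟨k, hk0, hk1, hk2⟩ := ih
    by_cases h : n + 1 ≤ pvT (k + 1)
    · exact ⟨k, hk0, by omega, h⟩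
    · refine ⟨k + 1, by omega, by omega, ?_⟩
      have hsucc : pvT (k + 1) + (k + 2) = pvT (k + 1 + 1) := by
        have ha := pvT_two (k + 1); have hb := pvT_two (k + 1 + 1); nlinarith
      omega

theorem pvK_lt_U {U k : Int} (h : pvKSpec U k) : k < U := by
  obtain ⟨h0, h1, _⟩ := h
  have := pvT_ge_self h0; omega

-- A's loop, started at s with current_sum = T(s-1), emits s, s+1, …, k and ends with sum T(k)
theorem pvALoop_eq {U k : Int} (hk : pvKSpec U k) :
    ∀ (fuel : Nat) (s : Int), 1 ≤ s → s ≤ k + 1 → (k + 2 - s).toNat ≤ fuel →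
    pvALoop fuel U s (pvT (s - 1)) = (PySem.List.pyRange s (k + 1) 1, pvT k) := by
  intro fuel
  induction fuel with
  | zero => intro s h1 h2 h3; omega
  | succ fuel ih =>
    intro s h1 h2 h3
    obtain ⟨hk0, hk1, hk2⟩ := hk
    have hstep := pvT_step s
    by_cases hs : s ≤ k
    · have hcond : pvT (s - 1) + s < U := by
        have := pvT_mono (a := s) (b := k) (by omega) hs; omega
      rw [pvALoop, if_pos hcond]
      have hrec : pvALoop fuel U (1 * s + 1) (pvT (s - 1) + s) =
          (PySem.List.pyRange (s + 1) (k + 1) 1, pvT k) := by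
        have harg : (1 : Int) * s + 1 = s + 1 := by ring
        have hcur : pvT (s - 1) + s = pvT (s + 1 - 1) := by
          rw [show s + 1 - 1 = s by ring]; exact hstep
        rw [harg, hcur]
        exact ih (s + 1) (by omega) (by omega) (by omega)
      simp only [hrec]
      rw [PySem.List.pyRange_one_cons (show s < k + 1 by omega)]
    · have hse : s = k + 1 := by omega
      have hcond : ¬ (pvT (s - 1) + s < U) := by
        rw [hse] at hstep ⊢
        rw [show (k : Int) + 1 - 1 = k from by ring] at hstep ⊢
        omega
      rw [pvALoop, if_neg hcond, hse]
      rw [PySem.List.pyRange_one_eq_nil (by omega)]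
      simp

-- B's binary search converges to the same k
theorem pvBSearch_eq {U k : Int} (hk : pvKSpec U k) :
    ∀ (fuel : Nat) (lo hi : Int), 0 ≤ lo → pvT lo < U → U ≤ pvT hi → lo < hi →
    (hi - lo).toNat ≤ fuel + 1 →
    pvBSearch fuel U lo hi = k := by
  intro fuel
  induction fuel with
  | zero =>
    intro lo hi hlo hTlo hThi hlt hfuel
    have hhi : hi = lo + 1 := by omega
    rw [pvBSearch]
    exact pvKSpec_unique ⟨hlo, hTlo, by rw [← hhi]; exact hThi⟩ hk
  | succ fuel ih =>
    intro lo hi hlo hTlo hThi hlt hfuel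
    rw [pvBSearch]
    by_cases hgap : hi - lo > 1
    · rw [if_pos hgap]
      have hmid := PySem.Int.floordiv_two_mid_bounds (lo := lo + 1) (hi := hi - 1) (by omega)
      rw [show lo + 1 + (hi - 1) = lo + hi by ring] at hmid
      set mid := PySem.Int.floordiv (lo + hi) 2 with hmiddef
      by_cases hT : PySem.Int.floordiv (mid * (mid + 1)) 2 < U
      · rw [if_pos hT]
        have hT' : pvT mid < U := hT
        exact ih mid hi (by omega) hT' hThi (by omega) (by omega)
      · rw [if_neg hT]
        have hT' : U ≤ pvT mid := by unfold pvT; omega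
        exact ih lo mid hlo hTlo hT' (by omega) (by omega)
    · rw [if_neg hgap]
      have hhi : hi = lo + 1 := by omega
      exact pvKSpec_unique ⟨hlo, hTlo, by rw [← hhi]; exact hThi⟩ hk

theorem pvEncode_agree (v : String) (c : List Int) : pvEncodeA v c = pvEncodeB v c := rfl

-- ===== VERDICT (by name: the statement is the Claim_ definition above) =====
theorem bounded_coefficient_encoding_py_spec : Claim_equal_bounded_coefficient_encoding_py := by
  intro U var_name _
  unfold Spec_bounded_coefficient_encoding_py
  unfold bounded_coefficient_encoding_py bounded_coefficient_encoding_py_alt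
  by_cases hU0 : U = 0
  · simp [hU0]
  · rw [if_neg hU0]
    by_cases hUneg : U ≤ 0
    · rw [if_pos hUneg]
      have hUn : U.toNat = 0 := by omega
      rw [hUn]
      show pvEncodeA var_name (if U - (pvALoop 1 U 1 0).2 > 0 then _ else _) = _
      rw [show pvALoop 1 U 1 0 = ([], 0) from by rw [pvALoop, if_neg (by omega)]]
      rw [if_neg (by omega)]
      rfl

    · rw [if_neg hUneg]
      have hU1 : 1 ≤ U := by omega
      obtain ⟨k, hk⟩ := pvKSpec_exists hU1
      have hkU : k < U := pvK_lt_U hk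
      have hk0 : 0 ≤ k := hk.1
      have hA : pvALoop (U.toNat + 1) U 1 0 = (PySem.List.pyRange 1 (k + 1) 1, pvT k) := by
        have := pvALoop_eq hk (U.toNat + 1) 1 (by omega) (by omega) (by omega)
        simpa [pvT_zero] using this
      have hB : pvBSearch U.toNat U 0 U = k :=
        pvBSearch_eq hk U.toNat 0 U (le_refl 0) (by rw [pvT_zero]; omega)
          (by have := pvT_two U; nlinarith) (by omega) (by omega)
      rw [hA, hB]
      show pvEncodeA var_name _ = pvEncodeB var_name _
      rw [pvEncode_agree]
      simp [pvT]
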